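-- pv_equiv track=rewrite | github.com/cerredz/Codebase-Refactor-Detection | services/LSH/lsh_helpers.py | create_signature
-- ===== SOURCE A (Python) =====
-- def create_signature(shingle_set: set, shingle_index_map: list, hash_functions):
--     shingle_indices = [shingle_index_map[shingle] for shingle in shingle_set if shingle in shingle_index_map]
--     if not shingle_indices:
--         return [len(hash_functions[0])] * len(hash_functions)
--
--     signature = []
--     for hash_func in hash_functions:
--         min_hash = min(hash_func[idx] for idx in shingle_indices)
--         signature.append(min_hash)
--
--     return signature
-- ===== SOURCE B (Python) =====
-- def _merge_min(idxs, hash_functions):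
--     # divide and conquer: signature of a single index is its hash column;
--     # signature of a longer range is the elementwise min of its halves' signatures
--     if len(idxs) == 1:
--         i = idxs[0]
--         return [hf[i] for hf in hash_functions]
--     n = len(idxs) // 2
--     left = _merge_min(idxs[:n], hash_functions)
--     right = _merge_min(idxs[n:], hash_functions)
--     return [a if a <= b else b for a, b in zip(left, right)]
--
--
-- def create_signature(shingle_set: set, shingle_index_map: list, hash_functions):
--     idxs = [shingle_index_map[s] for s in shingle_set if s in shingle_index_map]
--     if not idxs:
--         return [len(hash_functions[0])] * len(hash_functions)
--     return _merge_min(idxs, hash_functions)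
-- ===== Notes on version B (the rewrite author's own statement) =====
-- stated objective: alternative
-- what changed: B replaces A's independent linear min() scan per hash function by a divide-and-conquer tournament: it recursively splits the shingle-index list in halves, computes the sub-signature of each half, and merges the two signature vectors by elementwise minimum (correct because min is associative and commutative).
import Mathlib
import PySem

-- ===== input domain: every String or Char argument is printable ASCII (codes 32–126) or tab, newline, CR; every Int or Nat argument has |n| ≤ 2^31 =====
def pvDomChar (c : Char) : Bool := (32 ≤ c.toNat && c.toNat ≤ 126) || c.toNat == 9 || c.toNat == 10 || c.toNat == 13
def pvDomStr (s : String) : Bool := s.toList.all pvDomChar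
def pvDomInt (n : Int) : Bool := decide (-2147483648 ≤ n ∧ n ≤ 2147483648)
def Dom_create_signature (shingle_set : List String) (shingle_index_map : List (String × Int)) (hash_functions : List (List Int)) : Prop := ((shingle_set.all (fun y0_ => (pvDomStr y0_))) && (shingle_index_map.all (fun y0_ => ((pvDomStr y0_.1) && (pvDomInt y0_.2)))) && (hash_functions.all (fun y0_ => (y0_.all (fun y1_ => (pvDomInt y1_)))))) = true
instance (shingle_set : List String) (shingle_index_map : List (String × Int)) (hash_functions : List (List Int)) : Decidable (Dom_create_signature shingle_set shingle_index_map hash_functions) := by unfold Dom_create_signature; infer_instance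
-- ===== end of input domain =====

-- B replaces A's independent per-hash-function min() scan by a divide-and-conquer tournament
-- over the shingle-index list, merging half-signatures by elementwise minimum (alternative, same cost).

-- ===== PORT A =====
def create_signature (shingle_set : List String) (shingle_index_map : List (String × Int)) (hash_functions : List (List Int)) : List Int :=
  let shingle_indices := shingle_set.filterMap (fun s => PySem.Dict.get? (PySem.Dict.mk shingle_index_map) s)
  if shingle_indices = [] then
    List.replicate hash_functions.length (((PySem.List.pyGet? hash_functions 0).getD []).length : Int)
  else
    hash_functions.foldl (fun signature hash_func =>
      signature ++ [(PySem.List.min? (shingle_indices.map (fun idx => (PySem.List.pyGet? hash_func idx).getD 0)) (fun y => y)).getD 0]) []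

-- ===== PORT B =====
-- elementwise min of two signature vectors ([a if a <= b else b for a, b in zip(left, right)])
def zmin (left right : List Int) : List Int :=
  (left.zip right).map (fun p => if p.1 ≤ p.2 then p.1 else p.2)

-- _merge_min from Source B: divide and conquer over the index list
def mergeMin (idxs : List Int) (hash_functions : List (List Int)) : List Int :=
  match idxs with
  | [] => []
  | [i] => hash_functions.map (fun hf => (PySem.List.pyGet? hf i).getD 0)
  | a :: b :: t =>
    let n := (a :: b :: t).length / 2
    zmin (mergeMin ((a :: b :: t).take n) hash_functions)
         (mergeMin ((a :: b :: t).drop n) hash_functions)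
termination_by idxs.length
decreasing_by
  · simp [List.length_take]; omega
  · simp; omega

def create_signature_alt (shingle_set : List String) (shingle_index_map : List (String × Int)) (hash_functions : List (List Int)) : List Int :=
  let idxs := shingle_set.filterMap (fun s => PySem.Dict.get? (PySem.Dict.mk shingle_index_map) s)
  if idxs = [] then
    List.replicate hash_functions.length (((PySem.List.pyGet? hash_functions 0).getD []).length : Int)
  else
    mergeMin idxs hash_functions

-- ===== PRECONDITION & SPEC =====
-- Pre_ excludes exactly the inputs where Python A raises IndexError: no shingle matched and
-- hash_functions is empty (hash_functions[0] raises), or some looked-up shingle index is out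
-- of range for some hash function.
def Pre_create_signature (shingle_set : List String) (shingle_index_map : List (String × Int)) (hash_functions : List (List Int)) : Prop :=
  let idxs := shingle_set.filterMap (fun s => PySem.Dict.get? (PySem.Dict.mk shingle_index_map) s)
  if idxs = [] then hash_functions ≠ []
  else ∀ hf ∈ hash_functions, ∀ i ∈ idxs, PySem.Raise.InRange hf.length i
instance (shingle_set : List String) (shingle_index_map : List (String × Int)) (hash_functions : List (List Int)) : Decidable (Pre_create_signature shingle_set shingle_index_map hash_functions) := by unfold Pre_create_signature; infer_instance

def pvWitness_create_signature : List String × (List (String × Int)) × List (List Int) :=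
  (["a", "b"], [("a", 0), ("c", 1)], [[3, 5], [2, 7]])

def Spec_create_signature (shingle_set : List String) (shingle_index_map : List (String × Int)) (hash_functions : List (List Int)) (out : List Int) : Prop := out = create_signature_alt shingle_set shingle_index_map hash_functions
instance (shingle_set : List String) (shingle_index_map : List (String × Int)) (hash_functions : List (List Int)) (out : List Int) : Decidable (Spec_create_signature shingle_set shingle_index_map hash_functions out) := by unfold Spec_create_signature; infer_instance

-- ===== CLAIM (what is proved, stated in full; the proofs are below) =====
def Claim_equal_create_signature : Prop := ∀ (shingle_set : List String) (shingle_index_map : List (String × Int)) (hash_functions : List (List Int)), Dom_create_signature shingle_set shingle_index_map hash_functions → Pre_create_signature shingle_set shingle_index_map hash_functions → Spec_create_signature shingle_set shingle_index_map hash_functions (create_signature shingle_set shingle_index_map hash_functions)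

-- ===== LEMMAS AND PROOFS =====

-- A's append-accumulator loop over hash_functions is just a map.
theorem foldl_append_map {α β : Type} (f : α → β) (l : List α) (acc : List β) :
    l.foldl (fun s a => s ++ [f a]) acc = acc ++ l.map f := by
  induction l generalizing acc with
  | nil => simp
  | cons a t ih => simp [ih, List.append_assoc]

-- running min of one hash function over a nonempty index list (A's per-function value)
def fmin (g : Int → Int) (i : Int) (r : List Int) : Int :=
  r.foldl (fun s j => min s (g j)) (g i)

theorem foldl_min_acc (g : Int → Int) (t : List Int) (b c : Int) :
    t.foldl (fun s j => min s (g j)) (min b c) = min b (t.foldl (fun s j => min s (g j)) c) := by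
  induction t generalizing c with
  | nil => simp
  | cons x xs ih => simp only [List.foldl_cons, min_assoc]; exact ih (min c (g x))

theorem fmin_append (g : Int → Int) (i : Int) (r : List Int) (j : Int) (t : List Int) :
    fmin g i (r ++ (j :: t)) = min (fmin g i r) (fmin g j t) := by
  unfold fmin
  rw [List.foldl_append, List.foldl_cons, foldl_min_acc]

-- elementwise min of two mapped vectors acts pointwise
theorem zmin_map {α : Type} (l : List α) (f k : α → Int) :
    zmin (l.map f) (l.map k) = l.map (fun x => min (f x) (k x)) := by
  unfold zmin
  induction l with
  | nil => rfl
  | cons a t ih => simp only [List.map_cons, List.zip_cons_cons, List.map]; rw [ih, min_def]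

-- the tournament merge computes each hash function's running minimum
theorem mergeMin_eq (idxs : List Int) (hfs : List (List Int)) :
    mergeMin idxs hfs = match idxs with
      | [] => ([] : List Int)
      | i :: r => hfs.map (fun hf => fmin (fun j => (PySem.List.pyGet? hf j).getD 0) i r) := by
  fun_induction mergeMin idxs hfs with
  | case1 => simp
  | case2 i => simp [fmin]
  | case3 a b t n ih1 ih2 =>
    have hn : n = (a :: b :: t).length / 2 := rfl
    have hn1 : 1 ≤ n := by rw [hn]; simp; omega
    have hnlt : n < (a :: b :: t).length := by rw [hn]; simp; omega
    have htk : (a :: b :: t).take n = a :: (b :: t).take (n - 1) := by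
      obtain ⟨m, hm⟩ := Nat.exists_eq_succ_of_ne_zero (Nat.one_le_iff_ne_zero.mp hn1)
      rw [hm]; simp
    obtain ⟨j, t', hdp⟩ : ∃ j t', (a :: b :: t).drop n = j :: t' := by
      cases hd : (a :: b :: t).drop n with
      | nil => exact absurd (List.drop_eq_nil_iff.mp hd) (not_le.mpr hnlt)
      | cons j t' => exact ⟨j, t', rfl⟩
    rw [ih1, ih2, htk, hdp]
    simp only []
    rw [zmin_map]
    have hcons : (b :: t) = (b :: t).take (n - 1) ++ (j :: t') := by
      have hsplit := List.take_append_drop n (a :: b :: t)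
      rw [htk, hdp] at hsplit
      simpa using hsplit.symm
    refine List.map_congr_left (fun hf _ => ?_)
    rw [← fmin_append, ← hcons]

theorem create_signature_spec : Claim_equal_create_signature := by
  intro ss sim hfs _ _
  unfold Spec_create_signature create_signature create_signature_alt
  simp only []
  cases h : ss.filterMap (fun s => PySem.Dict.get? (PySem.Dict.mk sim) s) with
  | nil => simp
  | cons i0 rest =>
    simp only [if_neg (List.cons_ne_nil i0 rest)]
    rw [foldl_append_map, List.nil_append, mergeMin_eq]
    refine List.map_congr_left (fun hf _ => ?_)
    rw [List.map_cons, PySem.List.min?_id_cons, Option.getD_some, List.foldl_map]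
    rfl
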